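-- pv_equiv track=rewrite | github.com/ziwenhahaha/daily-paper-reader | src/6.generate_docs.py | split_sidebar_tag
-- ===== SOURCE A (Python) =====
-- from typing import Any, Dict, List, Tuple
--
-- def split_sidebar_tag(tag: str) -> Tuple[str, str]:
--     """
--     将 tag 解析为 (kind, label)：
--     - keyword:xxx -> ("keyword", "xxx")
--     - query:xxx   -> ("query", "xxx")
--     - paper/ref/cite:xxx -> ("paper", "xxx")  # 预留：论文引用/跟踪标签
--     - 其它 -> ("other", 原文本)
--     """
--     raw = (tag or "").strip()
--     if not raw:
--         return ("other", "")
--     for prefix, kind in (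
--         ("keyword:", "keyword"),
--         ("query:", "query"),
--         ("paper:", "paper"),
--         ("ref:", "paper"),
--         ("cite:", "paper"),
--     ):
--         if raw.startswith(prefix):
--             return (kind, raw[len(prefix) :].strip())
--     return ("other", raw)
-- ===== SOURCE B (Python) =====
-- _KINDS = {
--     "keyword": "keyword",
--     "query": "query",
--     "paper": "paper",
--     "ref": "paper",
--     "cite": "paper",
-- }
--
-- def split_sidebar_tag(tag):
--     raw = (tag or "").strip()
--     head, sep, rest = raw.partition(":")
--     if sep:
--         kind = _KINDS.get(head)
--         if kind is not None:
--             return (kind, rest.strip())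
--     return ("other", raw)
-- ===== Notes on version B (the rewrite author's own statement) =====
-- stated objective: alternative
-- what changed: B parses the string once by partitioning at the first colon and doing one dict lookup on the head, instead of A's loop testing five prefixes with startswith and re-slicing.
import Mathlib
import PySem

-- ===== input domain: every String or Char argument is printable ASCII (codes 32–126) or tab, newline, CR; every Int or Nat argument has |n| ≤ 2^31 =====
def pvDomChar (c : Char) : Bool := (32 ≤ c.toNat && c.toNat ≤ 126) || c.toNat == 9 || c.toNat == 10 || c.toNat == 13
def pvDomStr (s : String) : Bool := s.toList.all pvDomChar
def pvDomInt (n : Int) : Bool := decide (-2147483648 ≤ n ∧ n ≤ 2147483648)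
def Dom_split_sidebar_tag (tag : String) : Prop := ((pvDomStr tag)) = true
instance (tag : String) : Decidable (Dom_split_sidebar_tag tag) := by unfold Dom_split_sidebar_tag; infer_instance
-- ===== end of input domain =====

-- B replaces A's five-prefix startswith loop by a single partition at the first colon plus a dict lookup on the head (different decomposition; return values proved equal).


-- ===== PORT A =====
-- A's for-loop over the five (prefix, kind) pairs with its early return
def pvScanPrefixes (raw : String) : List (String × String) → String × String
  | [] => ("other", raw)
  | (prefix_, kind) :: rest =>
      if PySem.Str.startswith raw prefix_ then
        (kind, PySem.Str.strip (PySem.Str.slice raw (some (PySem.Str.len prefix_)) none))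
      else pvScanPrefixes raw rest

def split_sidebar_tag (tag : String) : String × String :=
  let raw := PySem.Str.strip tag
  if raw = "" then ("other", "")
  else
    pvScanPrefixes raw
      [("keyword:", "keyword"), ("query:", "query"), ("paper:", "paper"),
       ("ref:", "paper"), ("cite:", "paper")]

-- ===== PORT B =====
-- str.partition(':') on the char list: (head, sep-found?, rest)
def pvPartitionColon : List Char → List Char × Bool × List Char
  | [] => ([], false, [])
  | c :: cs =>
      if c = ':' then ([], true, cs)
      else
        let r := pvPartitionColon cs
        (c :: r.1, r.2.1, r.2.2)

def pvKinds : PySem.Dict String String :=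
  PySem.Dict.ofList
    [("keyword", "keyword"), ("query", "query"), ("paper", "paper"),
     ("ref", "paper"), ("cite", "paper")]

def split_sidebar_tag_alt (tag : String) : String × String :=
  let raw := PySem.Str.strip tag
  let parts := pvPartitionColon raw.toList          -- head, sep, rest = raw.partition(':')
  if parts.2.1 then
    match pvKinds.get? (String.ofList parts.1) with
    | some kind => (kind, String.ofList (PySem.Chars.strip parts.2.2))
    | none => ("other", raw)
  else ("other", raw)

-- ===== PRECONDITION & SPEC =====
def Spec_split_sidebar_tag (tag : String) (out : String × String) : Prop := out = split_sidebar_tag_alt tag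
instance (tag : String) (out : String × String) : Decidable (Spec_split_sidebar_tag tag out) := by unfold Spec_split_sidebar_tag; infer_instance

-- ===== CLAIM (what is proved, stated in full; the proofs are below) =====
def Claim_equal_split_sidebar_tag : Prop := ∀ (tag : String), Dom_split_sidebar_tag tag → Spec_split_sidebar_tag tag (split_sidebar_tag tag)

-- ===== LEMMAS AND PROOFS =====

theorem pvPartition_true (l : List Char)
    (hf : (pvPartitionColon l).2.1 = true) :
    l = (pvPartitionColon l).1 ++ ':' :: (pvPartitionColon l).2.2 ∧
      ':' ∉ (pvPartitionColon l).1 := by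
  induction l with
  | nil => simp [pvPartitionColon] at hf
  | cons c cs ih =>
      by_cases hc : c = ':'
      · subst hc; simp [pvPartitionColon]
      · simp only [pvPartitionColon, if_neg hc] at hf ⊢
        obtain ⟨h1, h2⟩ := ih hf
        refine ⟨?_, ?_⟩
        · conv_lhs => rw [h1]
          simp
        · simp only [List.mem_cons, not_or]
          exact ⟨fun hcc => hc hcc.symm, h2⟩

theorem pvPartition_false (l : List Char)
    (hf : (pvPartitionColon l).2.1 = false) :
    ':' ∉ l := by
  induction l with
  | nil => simp
  | cons c cs ih =>
      by_cases hc : c = ':'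
      · subst hc; simp [pvPartitionColon] at hf
      · simp only [pvPartitionColon, if_neg hc] at hf
        simp only [List.mem_cons, not_or]
        exact ⟨fun hcc => hc hcc.symm, ih hf⟩

theorem pvPrefix_of (p : List Char) : ∀ (h t : List Char), ':' ∉ p → ':' ∉ h →
    (p ++ [':']) <+: (h ++ ':' :: t) → p = h := by
  induction p with
  | nil =>
      intro h t hp hh hpre
      cases h with
      | nil => rfl
      | cons b h' =>
          obtain ⟨u, hu⟩ := hpre
          simp only [List.nil_append, List.cons_append, List.cons.injEq] at hu
          exact absurd (hu.1 ▸ List.mem_cons_self) hh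
  | cons a p' ih =>
      intro h t hp hh hpre
      cases h with
      | nil =>
          obtain ⟨u, hu⟩ := hpre
          simp only [List.cons_append, List.nil_append, List.cons.injEq] at hu
          exact absurd (hu.1 ▸ List.mem_cons_self) hp
      | cons b h' =>
          obtain ⟨u, hu⟩ := hpre
          simp only [List.cons_append, List.cons.injEq] at hu
          have hp' : ':' ∉ p' := fun m => hp (List.mem_cons_of_mem _ m)
          have hh' : ':' ∉ h' := fun m => hh (List.mem_cons_of_mem _ m)
          have hrec := ih h' t hp' hh' ⟨u, by simpa using hu.2⟩
          rw [hu.1, hrec]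

theorem pvPrefix_iff (p h t : List Char) (hp : ':' ∉ p) (hh : ':' ∉ h) :
    (p ++ [':']) <+: (h ++ ':' :: t) ↔ p = h := by
  constructor
  · exact pvPrefix_of p h t hp hh
  · rintro rfl
    exact ⟨t, by simp⟩

-- a prefix containing ':' never matches a colon-free string
theorem pvStartswith_false (raw q : String) (hq : ':' ∈ q.toList)
    (hnc : ':' ∉ raw.toList) : PySem.Str.startswith raw q = false := by
  rw [Bool.eq_false_iff]
  intro hc
  rw [show PySem.Str.startswith raw q = PySem.Chars.startswith raw.toList q.toList by
        simp [pysem],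
      PySem.Chars.startswith_iff] at hc
  exact hnc (hc.subset hq)

-- startswith "p:" read through the partition of raw at the first ':'
theorem pvStartswith_true_iff (raw q : String) (p h t : List Char)
    (hq : q.toList = p ++ [':']) (hp : ':' ∉ p)
    (h1 : raw.toList = h ++ ':' :: t) (h2 : ':' ∉ h) :
    PySem.Str.startswith raw q = true ↔ p = h := by
  rw [show PySem.Str.startswith raw q = PySem.Chars.startswith raw.toList q.toList by
        simp [pysem],
      PySem.Chars.startswith_iff, hq, h1, pvPrefix_iff p h t hp h2]

-- the suffix A slices off after a hit equals the partition's rest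
theorem pvSlice_rest (raw : String) (p t : List Char) (i : Int)
    (h1 : raw.toList = p ++ ':' :: t) (hi : i = (p.length : Int) + 1) :
    (PySem.Str.slice raw (some i) none).toList = t := by
  rw [show (PySem.Str.slice raw (some i) none).toList =
        PySem.List.slice raw.toList (some i) none by simp [pysem]]
  rw [hi, show ((p.length : Int) + 1) = ((p.length + 1 : Nat) : Int) by push_cast; ring,
      PySem.List.slice_from_natCast, h1]
  simp

-- a hit case: A's (kind, raw[len(q):].strip()) equals B's (kind, rest.strip())
theorem pvHit (raw q kind : String) (p t : List Char)
    (hq : q.toList = p ++ [':'])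
    (h1 : raw.toList = p ++ ':' :: t) :
    (kind, PySem.Str.strip (PySem.Str.slice raw (some (PySem.Str.len q)) none))
      = (kind, String.ofList (PySem.Chars.strip t)) := by
  refine Prod.ext rfl ?_
  apply String.toList_inj.mp
  have hlen : PySem.Str.len q = (p.length : Int) + 1 := by
    rw [show PySem.Str.len q = (q.toList.length : Int) by simp [pysem], hq]
    simp
  rw [hlen]
  rw [show (PySem.Str.strip (PySem.Str.slice raw (some ((p.length : Int) + 1)) none)).toList
        = PySem.Chars.strip (PySem.Str.slice raw (some ((p.length : Int) + 1)) none).toList by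
        simp [pysem]]
  rw [pvSlice_rest raw p t _ h1 rfl]
  simp

-- the whole equivalence, for any stripped string raw
theorem pvMain (raw : String) :
    (if raw = "" then (("other" : String), ("" : String))
     else pvScanPrefixes raw
        [("keyword:", "keyword"), ("query:", "query"), ("paper:", "paper"),
         ("ref:", "paper"), ("cite:", "paper")])
    = (if (pvPartitionColon raw.toList).2.1 then
         match pvKinds.get? (String.ofList (pvPartitionColon raw.toList).1) with
         | some kind => (kind, String.ofList (PySem.Chars.strip (pvPartitionColon raw.toList).2.2))
         | none => ("other", raw)
       else ("other", raw)) := by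
  by_cases hemp : raw = ""
  · subst hemp
    decide
  · rw [if_neg hemp]
    rcases hfb : (pvPartitionColon raw.toList).2.1 with _ | _
    · -- no ':' in raw: every prefix test fails, B takes the sep-less branch
      have hnc := pvPartition_false raw.toList hfb
      simp only [pvScanPrefixes,
        pvStartswith_false raw "keyword:" (by decide) hnc,
        pvStartswith_false raw "query:" (by decide) hnc,
        pvStartswith_false raw "paper:" (by decide) hnc,
        pvStartswith_false raw "ref:" (by decide) hnc,
        pvStartswith_false raw "cite:" (by decide) hnc,
        Bool.false_eq_true, if_false]
    · obtain ⟨h1, h2⟩ := pvPartition_true raw.toList hfb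
      rw [if_pos rfl]
      set h := (pvPartitionColon raw.toList).1 with hh
      set t := (pvPartitionColon raw.toList).2.2 with ht
      have hiff : ∀ q : String, ∀ p : List Char, q.toList = p ++ [':'] → ':' ∉ p →
          (PySem.Str.startswith raw q = true ↔ p = h) :=
        fun q p hq hp => pvStartswith_true_iff raw q p h t hq hp h1 h2
      have hfalse : ∀ (q : String) (p : List Char), q.toList = p ++ [':'] → ':' ∉ p →
          p ≠ h → PySem.Str.startswith raw q = false := by
        intro q p hq hp hne
        rw [Bool.eq_false_iff]
        exact fun hc => hne ((hiff q p hq hp).mp hc)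
      by_cases hk0 : h = "keyword".toList
      · have epos : PySem.Str.startswith raw "keyword:" = true :=
          (hiff "keyword:" "keyword".toList (by decide) (by decide)).mpr hk0.symm
        rw [show pvScanPrefixes raw
              [("keyword:", "keyword"), ("query:", "query"), ("paper:", "paper"),
               ("ref:", "paper"), ("cite:", "paper")] =
            ("keyword", PySem.Str.strip (PySem.Str.slice raw (some (PySem.Str.len "keyword:")) none)) by
          simp only [pvScanPrefixes, epos, if_true]]
        rw [pvHit raw "keyword:" "keyword" "keyword".toList t (by decide) (by rw [h1, hk0])]
        rw [show String.ofList h = "keyword" from by rw [hk0]; decide]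
        rw [show pvKinds.get? "keyword" = some "keyword" from by decide]
      by_cases hk1 : h = "query".toList
      · have epos : PySem.Str.startswith raw "query:" = true :=
          (hiff "query:" "query".toList (by decide) (by decide)).mpr hk1.symm
        have e0 : PySem.Str.startswith raw "keyword:" = false :=
          hfalse "keyword:" "keyword".toList (by decide) (by decide)
            (by rw [hk1]; decide)
        rw [show pvScanPrefixes raw
              [("keyword:", "keyword"), ("query:", "query"), ("paper:", "paper"),
               ("ref:", "paper"), ("cite:", "paper")] =
            ("query", PySem.Str.strip (PySem.Str.slice raw (some (PySem.Str.len "query:")) none)) by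
          simp only [pvScanPrefixes, e0, epos, Bool.false_eq_true, if_false, if_true]]
        rw [pvHit raw "query:" "query" "query".toList t (by decide) (by rw [h1, hk1])]
        rw [show String.ofList h = "query" from by rw [hk1]; decide]
        rw [show pvKinds.get? "query" = some "query" from by decide]
      by_cases hk2 : h = "paper".toList
      · have epos : PySem.Str.startswith raw "paper:" = true :=
          (hiff "paper:" "paper".toList (by decide) (by decide)).mpr hk2.symm
        have e0 : PySem.Str.startswith raw "keyword:" = false :=
          hfalse "keyword:" "keyword".toList (by decide) (by decide)
            (by rw [hk2]; decide)
        have e1 : PySem.Str.startswith raw "query:" = false :=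
          hfalse "query:" "query".toList (by decide) (by decide)
            (by rw [hk2]; decide)
        rw [show pvScanPrefixes raw
              [("keyword:", "keyword"), ("query:", "query"), ("paper:", "paper"),
               ("ref:", "paper"), ("cite:", "paper")] =
            ("paper", PySem.Str.strip (PySem.Str.slice raw (some (PySem.Str.len "paper:")) none)) by
          simp only [pvScanPrefixes, e0, e1, epos, Bool.false_eq_true, if_false, if_true]]
        rw [pvHit raw "paper:" "paper" "paper".toList t (by decide) (by rw [h1, hk2])]
        rw [show String.ofList h = "paper" from by rw [hk2]; decide]
        rw [show pvKinds.get? "paper" = some "paper" from by decide]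
      by_cases hk3 : h = "ref".toList
      · have epos : PySem.Str.startswith raw "ref:" = true :=
          (hiff "ref:" "ref".toList (by decide) (by decide)).mpr hk3.symm
        have e0 : PySem.Str.startswith raw "keyword:" = false :=
          hfalse "keyword:" "keyword".toList (by decide) (by decide)
            (by rw [hk3]; decide)
        have e1 : PySem.Str.startswith raw "query:" = false :=
          hfalse "query:" "query".toList (by decide) (by decide)
            (by rw [hk3]; decide)
        have e2 : PySem.Str.startswith raw "paper:" = false :=
          hfalse "paper:" "paper".toList (by decide) (by decide)
            (by rw [hk3]; decide)
        rw [show pvScanPrefixes raw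
              [("keyword:", "keyword"), ("query:", "query"), ("paper:", "paper"),
               ("ref:", "paper"), ("cite:", "paper")] =
            ("paper", PySem.Str.strip (PySem.Str.slice raw (some (PySem.Str.len "ref:")) none)) by
          simp only [pvScanPrefixes, e0, e1, e2, epos, Bool.false_eq_true, if_false, if_true]]
        rw [pvHit raw "ref:" "paper" "ref".toList t (by decide) (by rw [h1, hk3])]
        rw [show String.ofList h = "ref" from by rw [hk3]; decide]
        rw [show pvKinds.get? "ref" = some "paper" from by decide]
      by_cases hk4 : h = "cite".toList
      · have epos : PySem.Str.startswith raw "cite:" = true :=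
          (hiff "cite:" "cite".toList (by decide) (by decide)).mpr hk4.symm
        have e0 : PySem.Str.startswith raw "keyword:" = false :=
          hfalse "keyword:" "keyword".toList (by decide) (by decide)
            (by rw [hk4]; decide)
        have e1 : PySem.Str.startswith raw "query:" = false :=
          hfalse "query:" "query".toList (by decide) (by decide)
            (by rw [hk4]; decide)
        have e2 : PySem.Str.startswith raw "paper:" = false :=
          hfalse "paper:" "paper".toList (by decide) (by decide)
            (by rw [hk4]; decide)
        have e3 : PySem.Str.startswith raw "ref:" = false :=
          hfalse "ref:" "ref".toList (by decide) (by decide)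
            (by rw [hk4]; decide)
        rw [show pvScanPrefixes raw
              [("keyword:", "keyword"), ("query:", "query"), ("paper:", "paper"),
               ("ref:", "paper"), ("cite:", "paper")] =
            ("paper", PySem.Str.strip (PySem.Str.slice raw (some (PySem.Str.len "cite:")) none)) by
          simp only [pvScanPrefixes, e0, e1, e2, e3, epos, Bool.false_eq_true, if_false, if_true]]
        rw [pvHit raw "cite:" "paper" "cite".toList t (by decide) (by rw [h1, hk4])]
        rw [show String.ofList h = "cite" from by rw [hk4]; decide]
        rw [show pvKinds.get? "cite" = some "paper" from by decide]
      -- head matches no key: A's loop falls through, B's lookup misses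
      have e0 : PySem.Str.startswith raw "keyword:" = false :=
        hfalse "keyword:" "keyword".toList (by decide) (by decide) (fun he => hk0 he.symm)
      have e1 : PySem.Str.startswith raw "query:" = false :=
        hfalse "query:" "query".toList (by decide) (by decide) (fun he => hk1 he.symm)
      have e2 : PySem.Str.startswith raw "paper:" = false :=
        hfalse "paper:" "paper".toList (by decide) (by decide) (fun he => hk2 he.symm)
      have e3 : PySem.Str.startswith raw "ref:" = false :=
        hfalse "ref:" "ref".toList (by decide) (by decide) (fun he => hk3 he.symm)
      have e4 : PySem.Str.startswith raw "cite:" = false :=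
        hfalse "cite:" "cite".toList (by decide) (by decide) (fun he => hk4 he.symm)
      have hget : pvKinds.get? (String.ofList h) = none := by
        have n0 : ("keyword" : String) ≠ String.ofList h := fun e => hk0 (by simpa using (congrArg String.toList e).symm)
        have n1 : ("query" : String) ≠ String.ofList h := fun e => hk1 (by simpa using (congrArg String.toList e).symm)
        have n2 : ("paper" : String) ≠ String.ofList h := fun e => hk2 (by simpa using (congrArg String.toList e).symm)
        have n3 : ("ref" : String) ≠ String.ofList h := fun e => hk3 (by simpa using (congrArg String.toList e).symm)
        have n4 : ("cite" : String) ≠ String.ofList h := fun e => hk4 (by simpa using (congrArg String.toList e).symm)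
        rw [show pvKinds = PySem.Dict.mk
              [("keyword", "keyword"), ("query", "query"), ("paper", "paper"),
               ("ref", "paper"), ("cite", "paper")] from by decide]
        simp [PySem.Dict.get?_mk_cons, n0, n1, n2, n3, n4]
        rfl
      rw [hget]
      simp only [pvScanPrefixes, e0, e1, e2, e3, e4, Bool.false_eq_true, if_false]

-- ===== VERDICT (by name: the statement is the Claim_ definition above) =====
theorem split_sidebar_tag_spec : Claim_equal_split_sidebar_tag := by
  intro tag _
  unfold Spec_split_sidebar_tag split_sidebar_tag split_sidebar_tag_alt
  exact pvMain (PySem.Str.strip tag)
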